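-- pv_equiv track=rewrite | github.com/jkotlarz/TREEMATE | bdl.py | predict_harvest_area_allspecies
-- ===== SOURCE A (Python) =====
-- def predict_harvest_area_allspecies(harvest_areas):
-- #    harvest_areas = predict_harvest_areas(areas, time_projection)
--     harvest_area_sum = []
--     for i_s in range(len(harvest_areas)):
--         for t in range(len(harvest_areas[0])):
--             if (i_s == 0):
--                 harvest_area_sum.append(harvest_areas[i_s][t])
--             else:
--                 harvest_area_sum[t] += harvest_areas[i_s][t]
--     return harvest_area_sum
-- ===== SOURCE B (Python) =====
-- def predict_harvest_area_allspecies(harvest_areas):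
--     if not harvest_areas:
--         return []
--     return [sum(row[t] for row in harvest_areas)
--             for t in range(len(harvest_areas[0]))]
-- ===== Notes on version B (the rewrite author's own statement) =====
-- stated objective: simpler
-- what changed: B computes each column sum directly with one comprehension over column indices (sum over rows per column), replacing A's row-major accumulation that special-cases the first row with append and mutates earlier entries in place.
import Mathlib
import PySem

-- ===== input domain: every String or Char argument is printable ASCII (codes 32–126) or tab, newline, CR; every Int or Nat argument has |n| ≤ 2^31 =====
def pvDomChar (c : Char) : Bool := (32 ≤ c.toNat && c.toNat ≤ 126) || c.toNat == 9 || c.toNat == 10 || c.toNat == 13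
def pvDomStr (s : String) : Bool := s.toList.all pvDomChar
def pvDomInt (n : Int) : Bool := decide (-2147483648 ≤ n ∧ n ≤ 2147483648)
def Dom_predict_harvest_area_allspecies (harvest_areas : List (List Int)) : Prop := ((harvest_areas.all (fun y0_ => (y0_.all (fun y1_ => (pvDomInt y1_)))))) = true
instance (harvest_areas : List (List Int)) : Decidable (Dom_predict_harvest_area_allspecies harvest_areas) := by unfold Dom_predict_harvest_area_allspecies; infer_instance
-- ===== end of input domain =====

-- B computes each column sum directly (one reduction per column index) instead of
-- A's row-major pass that appends the first row and mutates earlier entries in place: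
-- simpler decomposition, same return value on Pre_.

-- ===== PORT A =====
def predict_harvest_area_allspecies (harvest_areas : List (List Int)) : List Int :=
  (PySem.List.pyRange 0 harvest_areas.length 1).foldl (fun harvest_area_sum i_s =>
    (PySem.List.pyRange 0 (PySem.List.pyGetD harvest_areas 0 []).length 1).foldl
      (fun harvest_area_sum t =>
        if i_s == 0 then
          harvest_area_sum ++ [PySem.List.pyGetD (PySem.List.pyGetD harvest_areas i_s []) t 0]
        else
          PySem.List.pySetD harvest_area_sum t
            (PySem.List.pyGetD harvest_area_sum t 0 +
              PySem.List.pyGetD (PySem.List.pyGetD harvest_areas i_s []) t 0))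
      harvest_area_sum) []

-- ===== PORT B =====
def predict_harvest_area_allspecies_alt (harvest_areas : List (List Int)) : List Int :=
  match harvest_areas with
  | [] => []
  | r0 :: _ =>
    (PySem.List.pyRange 0 r0.length 1).map (fun t =>
      harvest_areas.foldl (fun s row => s + PySem.List.pyGetD row t 0) 0)

-- ===== PRECONDITION & SPEC =====
-- Pre_ excludes exactly the ragged inputs on which Python A raises IndexError
-- (some row shorter than the first row); B raises there too.
def Pre_predict_harvest_area_allspecies (harvest_areas : List (List Int)) : Prop :=
  ∀ row ∈ harvest_areas, (harvest_areas.headD []).length ≤ row.length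
instance (harvest_areas : List (List Int)) : Decidable (Pre_predict_harvest_area_allspecies harvest_areas) := by unfold Pre_predict_harvest_area_allspecies; infer_instance

def pvWitness_predict_harvest_area_allspecies : List (List Int) := [[1, 2], [3, 4], [5, 6]]

def Spec_predict_harvest_area_allspecies (harvest_areas : List (List Int)) (out : List Int) : Prop := out = predict_harvest_area_allspecies_alt harvest_areas
instance (harvest_areas : List (List Int)) (out : List Int) : Decidable (Spec_predict_harvest_area_allspecies harvest_areas out) := by unfold Spec_predict_harvest_area_allspecies; infer_instance

-- ===== CLAIM (what is proved, stated in full; the proofs are below) =====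
def Claim_equal_predict_harvest_area_allspecies : Prop := ∀ (harvest_areas : List (List Int)), Dom_predict_harvest_area_allspecies harvest_areas → Pre_predict_harvest_area_allspecies harvest_areas → Spec_predict_harvest_area_allspecies harvest_areas (predict_harvest_area_allspecies harvest_areas)

-- ===== LEMMAS AND PROOFS =====

-- The inner pass of A for a later row adds row's entries pointwise onto the
-- accumulator; with acc.length = k ≤ row.length this is zipWith (+).
theorem pv_inner_update (k : Nat) (acc row : List Int)
    (hk : k ≤ acc.length) (hrow : acc.length ≤ row.length) :
    (PySem.List.pyRange 0 (k : Int) 1).foldl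
      (fun a t => PySem.List.pySetD a t
        (PySem.List.pyGetD a t 0 + PySem.List.pyGetD row t 0)) acc
    = (List.zipWith (· + ·) (acc.take k) (row.take k)) ++ acc.drop k := by
  induction k generalizing acc with
  | zero => simp [PySem.List.pyRange_one_eq_nil]
  | succ k ih =>
    have hk' : k < acc.length := by omega
    have hkr : k < row.length := by omega
    rw [show ((k + 1 : Nat) : Int) = (k : Int) + 1 by push_cast; ring,
        PySem.List.pyRange_one_succ_right (by positivity), List.foldl_append,
        ih acc (by omega) hrow]
    set Z := List.zipWith (· + ·) (acc.take k) (row.take k) with hZdef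
    have hZ : Z.length = k := by
      simp [hZdef, List.length_zipWith]; omega
    have hMlen : k < (Z ++ acc.drop k).length := by
      simp [hZ]; omega
    have e1 : PySem.List.pyGetD (Z ++ acc.drop k) (k : Int) 0 = acc[k] := by
      rw [PySem.List.pyGetD_natCast, List.getD_eq_getElem _ _ hMlen,
          List.getElem_append_right (by omega)]
      simp [hZ]
    have e2 : PySem.List.pyGetD row (k : Int) 0 = row[k] := by
      rw [PySem.List.pyGetD_natCast, List.getD_eq_getElem _ _ hkr]
    simp only [List.foldl_cons, List.foldl_nil, e1, e2, PySem.List.pySetD_natCast]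
    rw [List.drop_eq_getElem_cons hk', List.set_append]
    rw [if_neg (by omega)]
    rw [List.take_add_one, List.take_add_one, List.getElem?_eq_getElem hk',
        List.getElem?_eq_getElem hkr]
    rw [List.zipWith_append (by simp; omega)]
    rw [show k - Z.length = 0 from by omega, List.set_cons_zero]
    simp [hZdef]

theorem pv_spec_aux (m : Nat) (rest : List (List Int)) (acc : List Int)
    (hacc : acc.length = m) (hrest : ∀ row ∈ rest, m ≤ row.length) :
    rest.foldl (fun a row => List.zipWith (· + ·) a row) acc
    = (PySem.List.pyRange 0 (m : Int) 1).map (fun t =>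
        rest.foldl (fun s row => s + PySem.List.pyGetD row t 0)
          (PySem.List.pyGetD acc t 0)) := by
  induction rest generalizing acc with
  | nil =>
    simp only [List.foldl_nil]
    subst hacc
    exact (PySem.List.map_pyGetD_pyRange_zero acc 0).symm
  | cons row rest ih =>
    simp only [List.foldl_cons]
    have hrowlen : m ≤ row.length := hrest row (List.mem_cons_self ..)
    have hlen : (List.zipWith (· + ·) acc row).length = m := by
      simp [List.length_zipWith, hacc]; omega
    rw [ih _ hlen (fun r hr => hrest r (List.mem_cons_of_mem _ hr))]
    apply List.map_congr_left
    intro t ht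
    rw [PySem.List.mem_pyRange_one] at ht
    have h0 : (0:Int) ≤ t := ht.1
    have hget : PySem.List.pyGetD (List.zipWith (· + ·) acc row) t 0
        = PySem.List.pyGetD acc t 0 + PySem.List.pyGetD row t 0 := by
      have h1 : t < ((List.zipWith (· + ·) acc row).length : Int) := by
        rw [hlen]; exact ht.2
      have h2 : t < (acc.length : Int) := by omega
      have h3 : t < (row.length : Int) := by
        have : (m : Int) ≤ (row.length : Int) := by exact_mod_cast hrowlen
        omega
      rw [PySem.List.pyGetD_eq_getElem _ _ h0 h1,
          PySem.List.pyGetD_eq_getElem _ _ h0 h2,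
          PySem.List.pyGetD_eq_getElem _ _ h0 h3]
      exact List.getElem_zipWith ..
    rw [hget]

theorem pv_zipWith_take (acc row : List Int) (h : acc.length ≤ row.length) :
    List.zipWith (· + ·) acc (row.take acc.length) = List.zipWith (· + ·) acc row := by
  conv_rhs => rw [List.zipWith_eq_zipWith_take_min]
  have hmin : min acc.length row.length = acc.length := by omega
  simp [hmin]

theorem pv_outer (m : Nat) (rest : List (List Int)) (acc : List Int)
    (hacc : acc.length = m) (hrest : ∀ row ∈ rest, m ≤ row.length) :
    rest.foldl (fun a row => (PySem.List.pyRange 0 (m : Int) 1).foldl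
        (fun a t => PySem.List.pySetD a t
          (PySem.List.pyGetD a t 0 + PySem.List.pyGetD row t 0)) a) acc
    = rest.foldl (fun a row => List.zipWith (· + ·) a row) acc := by
  induction rest generalizing acc with
  | nil => rfl
  | cons row rest ih =>
    have hrow : m ≤ row.length := hrest row (List.mem_cons_self ..)
    simp only [List.foldl_cons]
    rw [pv_inner_update m acc row (by omega) (by omega),
        show acc.take m = acc from by rw [← hacc]; exact List.take_length,
        show acc.drop m = [] from by rw [← hacc]; exact List.drop_length,
        List.append_nil,
        show List.zipWith (· + ·) acc (row.take m) = List.zipWith (· + ·) acc row from by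
          rw [← hacc]; exact pv_zipWith_take acc row (by omega)]
    exact ih _ (by simp [List.length_zipWith]; omega)
      (fun r hr => hrest r (List.mem_cons_of_mem _ hr))

-- ===== VERDICT (by name: the statement is the Claim_ definition above) =====
theorem predict_harvest_area_allspecies_spec : Claim_equal_predict_harvest_area_allspecies := by
  intro hs _hdom hpre
  unfold Spec_predict_harvest_area_allspecies
  cases hs with
  | nil => rfl
  | cons r0 rest =>
    have hrest : ∀ row ∈ r0 :: rest, r0.length ≤ row.length := by
      simpa [Pre_predict_harvest_area_allspecies] using hpre
    unfold predict_harvest_area_allspecies predict_harvest_area_allspecies_alt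
    rw [PySem.List.pyRange_one_cons
          (show (0 : Int) < ((r0 :: rest).length : Int) by simp),
        List.foldl_cons]
    simp only [PySem.List.pyGetD_zero_cons, beq_self_eq_true, if_true]
    rw [PySem.List.foldl_append_singleton_eq_map, List.nil_append,
        PySem.List.map_pyGetD_pyRange_zero']
    rw [PySem.List.foldl_congr_mem _ _
          (fun acc i_s => (PySem.List.pyRange 0 (r0.length : Int) 1).foldl
            (fun a t => PySem.List.pySetD a t
              (PySem.List.pyGetD a t 0 +
                PySem.List.pyGetD (PySem.List.pyGetD (r0 :: rest) i_s []) t 0)) acc)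
          r0
          (by
            intro acc x hx
            rw [PySem.List.mem_pyRange_one] at hx
            have hx0 : (x == (0:Int)) = false := by
              simp only [beq_eq_false_iff_ne, ne_eq]
              omega
            simp only [hx0, Bool.false_eq_true, if_false])]
    rw [show ((r0 :: rest).length : Int) = (((r0 :: rest) : List (List Int)).length : Int) from rfl,
        PySem.List.foldl_pyRange_pyGetD' (r0 :: rest) ([] : List Int)
          (fun a row => (PySem.List.pyRange 0 (r0.length : Int) 1).foldl
            (fun a t => PySem.List.pySetD a t
              (PySem.List.pyGetD a t 0 + PySem.List.pyGetD row t 0)) a)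
          r0 (by norm_num)]
    rw [show List.drop ((0:Int) + 1).toNat (r0 :: rest) = rest from rfl]
    rw [pv_outer r0.length rest r0 rfl
          (fun r hr => hrest r (List.mem_cons_of_mem _ hr)),
        pv_spec_aux r0.length rest r0 rfl
          (fun r hr => hrest r (List.mem_cons_of_mem _ hr))]
    simp only [List.foldl_cons, zero_add]
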